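-- pv_equiv track=rewrite | github.com/draliii/adventofcode2023 | 14/14.py | get_min_stones
-- ===== SOURCE A (Python) =====
-- def new_array(rows, cols):
--     array = []
--     for i in range(rows):
--         a = []
--         for j in range(cols):
--             a.append(0)
--         array.append(a)
--     return array
--
-- def get_min_stones(data):
--
--     stonesN = new_array(len(data), len(data[0]))
--     for cid in range(len(data[0])):
--         last_stone = -1
--         for rid in range(len(data)):
--             if data[rid][cid] == "#":
--                 last_stone = rid
--             stonesN[rid][cid] = last_stone
--
--     stonesS = new_array(len(data), len(data[0]))
--     for cid in range(len(data[0])):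
--         last_stone = len(data)
--         for rid in range(len(data) - 1, -1, -1):
--             if data[rid][cid] == "#":
--                 last_stone = rid
--             stonesS[rid][cid] = last_stone
--
--     stonesW = new_array(len(data), len(data[0]))
--     for rid in range(len(data)):
--         last_stone = -1
--         for cid in range(len(data[0])):
--             if data[rid][cid] == "#":
--                 last_stone = cid
--             stonesW[rid][cid] = last_stone
--
--     stonesE = new_array(len(data), len(data[0]))
--     for rid in range(len(data)):
--         last_stone = len(data[0])
--         for cid in range(len(data[0])-1, -1, -1):
--             if data[rid][cid] == "#":
--                 last_stone = cid
--             stonesE[rid][cid] = last_stone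
--
--     return stonesN, stonesW, stonesS, stonesE
-- ===== SOURCE B (Python) =====
-- def get_min_stones(data):
--     H, W = len(data), len(data[0])
--
--     def north(r, c):
--         for i in range(r, -1, -1):
--             if data[i][c] == "#":
--                 return i
--         return -1
--
--     def south(r, c):
--         for i in range(r, H):
--             if data[i][c] == "#":
--                 return i
--         return H
--
--     def west(r, c):
--         for j in range(c, -1, -1):
--             if data[r][j] == "#":
--                 return j
--         return -1
--
--     def east(r, c):
--         for j in range(c, W):
--             if data[r][j] == "#":
--                 return j
--         return W
--
--     stonesN = [[north(r, c) for c in range(W)] for r in range(H)]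
--     stonesW = [[west(r, c) for c in range(W)] for r in range(H)]
--     stonesS = [[south(r, c) for c in range(W)] for r in range(H)]
--     stonesE = [[east(r, c) for c in range(W)] for r in range(H)]
--     return stonesN, stonesW, stonesS, stonesE
-- ===== Notes on version B (the rewrite author's own statement) =====
-- stated objective: alternative
-- what changed: A makes four stateful sweep passes that mutate preallocated 2D arrays while carrying a running last_stone; B instead builds each grid by a nested comprehension that, for every cell independently, searches outward in the relevant direction for the nearest wall.
-- outside the precondition, e.g. on get_min_stones([]): A raises IndexError, B raises IndexError; on get_min_stones(['##', '#']): A raises IndexError, B raises IndexError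
import Mathlib
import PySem

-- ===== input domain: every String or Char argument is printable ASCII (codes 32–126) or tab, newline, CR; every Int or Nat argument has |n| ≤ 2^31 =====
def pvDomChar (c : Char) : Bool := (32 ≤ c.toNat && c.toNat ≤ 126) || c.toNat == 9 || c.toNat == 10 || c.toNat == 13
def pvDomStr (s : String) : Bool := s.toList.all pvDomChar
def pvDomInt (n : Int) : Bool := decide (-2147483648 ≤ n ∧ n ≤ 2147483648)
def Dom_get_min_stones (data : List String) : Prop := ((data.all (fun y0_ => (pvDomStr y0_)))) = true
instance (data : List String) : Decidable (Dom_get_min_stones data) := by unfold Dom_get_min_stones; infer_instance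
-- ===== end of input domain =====

-- B replaces A's four stateful sweep passes over preallocated mutated arrays by an independent
-- per-cell outward search in each direction (objective: alternative; not faster).

-- ===== PORT A =====
-- data[r][c] as a Char; exact wherever Python indexes in range (guaranteed by Pre_; Python raises IndexError otherwise)
def pvCell (data : List String) (r c : Int) : Char :=
  (PySem.Str.pyGet? ((PySem.List.pyGet? data r).getD "") c).getD ' '

-- new_array(rows, cols)
def pvNewArray (rows cols : Int) : List (List Int) :=
  (PySem.List.pyRange 0 rows 1).foldl
    (fun array _ =>
      array ++ [(PySem.List.pyRange 0 cols 1).foldl (fun a _ => a ++ [(0 : Int)]) []])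
    []

-- stones[r][c] = v
def pvSet2 (m : List (List Int)) (r c : Int) (v : Int) : List (List Int) :=
  m.modify r.toNat (fun row => row.set c.toNat v)

-- the inner loop of the N/S passes (fixed column cid, iterate rows, running last_stone)
def pvSweepCol (data : List String) (cid : Int) (rows : List Int)
    (st : List (List Int) × Int) : List (List Int) × Int :=
  rows.foldl (fun p rid =>
    let last := if pvCell data rid cid == '#' then rid else p.2
    (pvSet2 p.1 rid cid last, last)) st

-- the inner loop of the W/E passes (fixed row rid, iterate columns, running last_stone)
def pvSweepRow (data : List String) (rid : Int) (cols : List Int)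
    (st : List (List Int) × Int) : List (List Int) × Int :=
  cols.foldl (fun p cid =>
    let last := if pvCell data rid cid == '#' then cid else p.2
    (pvSet2 p.1 rid cid last, last)) st

def get_min_stones (data : List String) : List (List Int) × List (List Int) × List (List Int) × List (List Int) :=
  let H : Int := (data.length : Int)
  let W : Int := PySem.Str.len ((PySem.List.pyGet? data 0).getD "")   -- len(data[0]); Python raises on empty data (Pre_)
  let stonesN := (PySem.List.pyRange 0 W 1).foldl
    (fun m cid => (pvSweepCol data cid (PySem.List.pyRange 0 H 1) (m, -1)).1) (pvNewArray H W)
  let stonesS := (PySem.List.pyRange 0 W 1).foldl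
    (fun m cid => (pvSweepCol data cid (PySem.List.pyRange (H-1) (-1) (-1)) (m, H)).1) (pvNewArray H W)
  let stonesW := (PySem.List.pyRange 0 H 1).foldl
    (fun m rid => (pvSweepRow data rid (PySem.List.pyRange 0 W 1) (m, -1)).1) (pvNewArray H W)
  let stonesE := (PySem.List.pyRange 0 H 1).foldl
    (fun m rid => (pvSweepRow data rid (PySem.List.pyRange (W-1) (-1) (-1)) (m, W)).1) (pvNewArray H W)
  (stonesN, stonesW, stonesS, stonesE)

-- ===== PORT B =====
-- 'for i in idxs: if wall: return i' / 'return d' (the body of each of Source B's four searchers)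
def pvFirst (p : Int → Bool) : List Int → Int → Int
  | [], d => d
  | i :: t, d => if p i then i else pvFirst p t d

def get_min_stones_alt (data : List String) : List (List Int) × List (List Int) × List (List Int) × List (List Int) :=
  let H : Int := (data.length : Int)
  let W : Int := PySem.Str.len ((PySem.List.pyGet? data 0).getD "")
  let north := fun (r c : Int) => pvFirst (fun i => pvCell data i c == '#') (PySem.List.pyRange r (-1) (-1)) (-1)
  let south := fun (r c : Int) => pvFirst (fun i => pvCell data i c == '#') (PySem.List.pyRange r H 1) H
  let west  := fun (r c : Int) => pvFirst (fun j => pvCell data r j == '#') (PySem.List.pyRange c (-1) (-1)) (-1)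
  let east  := fun (r c : Int) => pvFirst (fun j => pvCell data r j == '#') (PySem.List.pyRange c W 1) W
  ((PySem.List.pyRange 0 H 1).map (fun r => (PySem.List.pyRange 0 W 1).map (fun c => north r c)),
   (PySem.List.pyRange 0 H 1).map (fun r => (PySem.List.pyRange 0 W 1).map (fun c => west r c)),
   (PySem.List.pyRange 0 H 1).map (fun r => (PySem.List.pyRange 0 W 1).map (fun c => south r c)),
   (PySem.List.pyRange 0 H 1).map (fun r => (PySem.List.pyRange 0 W 1).map (fun c => east r c)))

-- ===== PRECONDITION & SPEC =====
-- Pre_ excludes exactly the inputs where Python A raises IndexError: empty data (data[0]),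
-- or a row shorter than the first row (data[rid][cid] is read for every cid < len(data[0])).
def Pre_get_min_stones (data : List String) : Prop :=
  data ≠ [] ∧ ∀ s ∈ data, (data.headD "").toList.length ≤ s.toList.length
instance (data : List String) : Decidable (Pre_get_min_stones data) := by unfold Pre_get_min_stones; infer_instance

def pvWitness_get_min_stones : List String := ["#..", ".O#", "..."]

def Spec_get_min_stones (data : List String) (out : List (List Int) × List (List Int) × List (List Int) × List (List Int)) : Prop := out = get_min_stones_alt data
instance (data : List String) (out : List (List Int) × List (List Int) × List (List Int) × List (List Int)) : Decidable (Spec_get_min_stones data out) := by unfold Spec_get_min_stones; infer_instance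

-- ===== CLAIM (what is proved, stated in full; the proofs are below) =====
def Claim_equal_get_min_stones : Prop := ∀ (data : List String), Dom_get_min_stones data → Pre_get_min_stones data → Spec_get_min_stones data (get_min_stones data)

-- ===== LEMMAS AND PROOFS =====

-- running last_stone over a processed index list (left to right)
def pvScanL (w : Int → Bool) : List Int → Int → Int
  | [], last => last
  | i :: t, last => pvScanL w t (if w i then i else last)

-- the prefix of an iteration order up to and including the first occurrence of r
def pvUpTo (r : Int) : List Int → List Int
  | [] => []
  | i :: t => if i = r then [i] else i :: pvUpTo r t

-- matrix entry as an option
def pvEnt (m : List (List Int)) (i j : Nat) : Option Int := m[i]?.bind (fun row => row[j]?)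

-- a matrix of Hn rows, each of length Wn
def pvShape (Hn Wn : Nat) (m : List (List Int)) : Prop :=
  m.length = Hn ∧ ∀ (i : Nat) (row : List Int), m[i]? = some row → row.length = Wn

theorem pvScanL_append (w : Int → Bool) (xs ys : List Int) (last : Int) :
    pvScanL w (xs ++ ys) last = pvScanL w ys (pvScanL w xs last) := by
  induction xs generalizing last with
  | nil => rfl
  | cons i t ih => simp [pvScanL, ih]

theorem pvFirst_eq_scanL_reverse (p : Int → Bool) (rs : List Int) (d : Int) :
    pvFirst p rs d = pvScanL p rs.reverse d := by
  induction rs generalizing d with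
  | nil => rfl
  | cons i t ih =>
    simp only [List.reverse_cons, pvFirst, pvScanL_append]
    by_cases h : p i <;> simp [pvScanL, h, ih]

theorem pvShape_set2 {Hn Wn : Nat} {m : List (List Int)} (h : pvShape Hn Wn m)
    (r c : Int) (v : Int) : pvShape Hn Wn (pvSet2 m r c v) := by
  obtain ⟨h1, h2⟩ := h
  refine ⟨by simp [pvSet2, h1], ?_⟩
  intro i row hrow
  rw [pvSet2, List.getElem?_modify] at hrow
  rcases hm : m[i]? with _ | row0 <;> rw [hm] at hrow
  · simp at hrow
  · simp only [Option.map_eq_map, Option.map_some, Option.some_inj] at hrow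
    split at hrow <;> rw [← hrow]
    · rw [List.length_set]; exact h2 i row0 hm
    · exact h2 i row0 hm

theorem pvEnt_set2_ne {m : List (List Int)} {i j : Nat} {r c : Int} (v : Int)
    (h : i ≠ r.toNat ∨ j ≠ c.toNat) :
    pvEnt (pvSet2 m r c v) i j = pvEnt m i j := by
  unfold pvEnt pvSet2
  rw [List.getElem?_modify]
  rcases hm : m[i]? with _ | row0
  · rfl
  · simp only [Option.map_eq_map, Option.map_some]
    rcases h with h | h
    · rw [if_neg (fun hh => h hh.symm)]
    · split
      · simp only [Option.bind_some]
        rw [List.getElem?_set, if_neg (fun hh : c.toNat = j => h hh.symm)]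
      · rfl

theorem pvEnt_set2_self {Hn Wn : Nat} {m : List (List Int)} (h : pvShape Hn Wn m)
    {r c : Int} (v : Int) (hr : r.toNat < Hn) (hc : c.toNat < Wn) :
    pvEnt (pvSet2 m r c v) r.toNat c.toNat = some v := by
  obtain ⟨h1, h2⟩ := h
  have hlt : r.toNat < m.length := h1 ▸ hr
  have hrow : m[r.toNat]? = some (m[r.toNat]) := List.getElem?_eq_getElem hlt
  unfold pvEnt pvSet2
  rw [List.getElem?_modify, hrow]
  simp only [Option.map_eq_map, Option.map_some, Option.bind_some, if_true]
  exact List.getElem?_set_self (by rw [h2 _ _ hrow]; exact hc)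

theorem pvSweepCol_cons (data : List String) (cid rid : Int) (t : List Int)
    (st : List (List Int) × Int) :
    pvSweepCol data cid (rid :: t) st =
      pvSweepCol data cid t
        (pvSet2 st.1 rid cid (if pvCell data rid cid == '#' then rid else st.2),
         if pvCell data rid cid == '#' then rid else st.2) := rfl

theorem pvSweepRow_cons (data : List String) (rid cid : Int) (t : List Int)
    (st : List (List Int) × Int) :
    pvSweepRow data rid (cid :: t) st =
      pvSweepRow data rid t
        (pvSet2 st.1 rid cid (if pvCell data rid cid == '#' then cid else st.2),
         if pvCell data rid cid == '#' then cid else st.2) := rfl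

theorem pvShape_sweepCol {Hn Wn : Nat} (data : List String) (cid : Int) :
    ∀ (rows : List Int) (st : List (List Int) × Int), pvShape Hn Wn st.1 →
    pvShape Hn Wn (pvSweepCol data cid rows st).1 := by
  intro rows
  induction rows with
  | nil => intro st h; exact h
  | cons rid t ih =>
    intro st h
    rw [pvSweepCol_cons]
    exact ih _ (pvShape_set2 h _ _ _)

theorem pvShape_sweepRow {Hn Wn : Nat} (data : List String) (rid : Int) :
    ∀ (cols : List Int) (st : List (List Int) × Int), pvShape Hn Wn st.1 →
    pvShape Hn Wn (pvSweepRow data rid cols st).1 := by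
  intro cols
  induction cols with
  | nil => intro st h; exact h
  | cons cid t ih =>
    intro st h
    rw [pvSweepRow_cons]
    exact ih _ (pvShape_set2 h _ _ _)

theorem pvSweepCol_entry {Hn Wn : Nat} (data : List String) (cid : Int)
    (_h0c : 0 ≤ cid) (hc : cid.toNat < Wn) :
    ∀ (rows : List Int) (m : List (List Int)) (last : Int) (i j : Nat),
    pvShape Hn Wn m → rows.Nodup → (∀ x ∈ rows, 0 ≤ x ∧ x.toNat < Hn) →
    pvEnt (pvSweepCol data cid rows (m, last)).1 i j =
      (if (i : Int) ∈ rows ∧ j = cid.toNat then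
        some (pvScanL (fun x => pvCell data x cid == '#') (pvUpTo (i : Int) rows) last)
      else pvEnt m i j) := by
  intro rows
  induction rows with
  | nil =>
    intro m last i j _ _ _
    rw [if_neg (by simp)]
    rfl
  | cons rid t ih =>
    intro m last i j hsh hnd hb
    obtain ⟨hrid0, hridH⟩ := hb rid (by simp)
    rw [pvSweepCol_cons]
    rw [ih _ _ i j (pvShape_set2 hsh _ _ _) (List.Nodup.of_cons hnd)
        (fun x hx => hb x (List.mem_cons_of_mem _ hx))]
    by_cases hj : j = cid.toNat
    · by_cases hieq : (i : Int) = rid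
      · have hnotmem : rid ∉ t := (List.nodup_cons.mp hnd).1
        have hit : (i : Int) ∉ t := by rw [hieq]; exact hnotmem
        have hc1 : ¬ ((i : Int) ∈ t ∧ j = cid.toNat) := by tauto
        have hc2 : ((i : Int) ∈ rid :: t ∧ j = cid.toNat) := ⟨by simp [hieq], hj⟩
        rw [if_neg hc1, if_pos hc2]
        have hi' : i = rid.toNat := by omega
        have hup : pvUpTo (i : Int) (rid :: t) = [rid] := by
          simp [pvUpTo, hieq.symm]
        rw [hup, hj, hi']
        simp only [pvScanL]
        exact pvEnt_set2_self hsh _ hridH hc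
      · by_cases hit : (i : Int) ∈ t
        · have hc1 : ((i : Int) ∈ t ∧ j = cid.toNat) := ⟨hit, hj⟩
          have hc2 : ((i : Int) ∈ rid :: t ∧ j = cid.toNat) := ⟨by simp [hit], hj⟩
          rw [if_pos hc1, if_pos hc2]
          have hup : pvUpTo (i : Int) (rid :: t) = rid :: pvUpTo (i : Int) t := by
            simp [pvUpTo, Ne.symm hieq]
          rw [hup]
          rfl
        · have hc1 : ¬ ((i : Int) ∈ t ∧ j = cid.toNat) := by tauto
          have hc2 : ¬ ((i : Int) ∈ rid :: t ∧ j = cid.toNat) := by simp [hit, hieq]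
          rw [if_neg hc1, if_neg hc2]
          exact pvEnt_set2_ne _ (Or.inl (by omega))
    · have hc1 : ¬ ((i : Int) ∈ t ∧ j = cid.toNat) := by tauto
      have hc2 : ¬ ((i : Int) ∈ rid :: t ∧ j = cid.toNat) := by tauto
      rw [if_neg hc1, if_neg hc2]
      exact pvEnt_set2_ne _ (Or.inr hj)

theorem pvSweepRow_entry {Hn Wn : Nat} (data : List String) (rid : Int)
    (_h0r : 0 ≤ rid) (hr : rid.toNat < Hn) :
    ∀ (cols : List Int) (m : List (List Int)) (last : Int) (i j : Nat),
    pvShape Hn Wn m → cols.Nodup → (∀ x ∈ cols, 0 ≤ x ∧ x.toNat < Wn) →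
    pvEnt (pvSweepRow data rid cols (m, last)).1 i j =
      (if (j : Int) ∈ cols ∧ i = rid.toNat then
        some (pvScanL (fun x => pvCell data rid x == '#') (pvUpTo (j : Int) cols) last)
      else pvEnt m i j) := by
  intro cols
  induction cols with
  | nil =>
    intro m last i j _ _ _
    rw [if_neg (by simp)]
    rfl
  | cons cid t ih =>
    intro m last i j hsh hnd hb
    obtain ⟨hcid0, hcidW⟩ := hb cid (by simp)
    rw [pvSweepRow_cons]
    rw [ih _ _ i j (pvShape_set2 hsh _ _ _) (List.Nodup.of_cons hnd)
        (fun x hx => hb x (List.mem_cons_of_mem _ hx))]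
    by_cases hi : i = rid.toNat
    · by_cases hjeq : (j : Int) = cid
      · have hnotmem : cid ∉ t := (List.nodup_cons.mp hnd).1
        have hjt : (j : Int) ∉ t := by rw [hjeq]; exact hnotmem
        have hc1 : ¬ ((j : Int) ∈ t ∧ i = rid.toNat) := by tauto
        have hc2 : ((j : Int) ∈ cid :: t ∧ i = rid.toNat) := ⟨by simp [hjeq], hi⟩
        rw [if_neg hc1, if_pos hc2]
        have hj' : j = cid.toNat := by omega
        have hup : pvUpTo (j : Int) (cid :: t) = [cid] := by
          simp [pvUpTo, hjeq.symm]
        rw [hup, hi, hj']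
        simp only [pvScanL]
        exact pvEnt_set2_self hsh _ hr hcidW
      · by_cases hjt : (j : Int) ∈ t
        · have hc1 : ((j : Int) ∈ t ∧ i = rid.toNat) := ⟨hjt, hi⟩
          have hc2 : ((j : Int) ∈ cid :: t ∧ i = rid.toNat) := ⟨by simp [hjt], hi⟩
          rw [if_pos hc1, if_pos hc2]
          have hup : pvUpTo (j : Int) (cid :: t) = cid :: pvUpTo (j : Int) t := by
            simp [pvUpTo, Ne.symm hjeq]
          rw [hup]
          rfl
        · have hc1 : ¬ ((j : Int) ∈ t ∧ i = rid.toNat) := by tauto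
          have hc2 : ¬ ((j : Int) ∈ cid :: t ∧ i = rid.toNat) := by simp [hjt, hjeq]
          rw [if_neg hc1, if_neg hc2]
          exact pvEnt_set2_ne _ (Or.inr (by omega))
    · have hc1 : ¬ ((j : Int) ∈ t ∧ i = rid.toNat) := by tauto
      have hc2 : ¬ ((j : Int) ∈ cid :: t ∧ i = rid.toNat) := by tauto
      rw [if_neg hc1, if_neg hc2]
      exact pvEnt_set2_ne _ (Or.inl hi)

theorem pvShape_foldCol {Hn Wn : Nat} (data : List String) (rows : List Int) (init : Int) :
    ∀ (cids : List Int) (m : List (List Int)), pvShape Hn Wn m →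
    pvShape Hn Wn (cids.foldl (fun m cid => (pvSweepCol data cid rows (m, init)).1) m) := by
  intro cids
  induction cids with
  | nil => intro m h; exact h
  | cons cid t ih =>
    intro m h
    rw [List.foldl_cons]
    exact ih _ (pvShape_sweepCol data cid rows _ h)

theorem pvShape_foldRow {Hn Wn : Nat} (data : List String) (cols : List Int) (init : Int) :
    ∀ (rids : List Int) (m : List (List Int)), pvShape Hn Wn m →
    pvShape Hn Wn (rids.foldl (fun m rid => (pvSweepRow data rid cols (m, init)).1) m) := by
  intro rids
  induction rids with
  | nil => intro m h; exact h
  | cons rid t ih =>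
    intro m h
    rw [List.foldl_cons]
    exact ih _ (pvShape_sweepRow data rid cols _ h)

theorem pvOuterCol_entry {Hn Wn : Nat} (data : List String) (rows : List Int) (init : Int)
    (hrs : rows.Nodup) (hrb : ∀ x ∈ rows, 0 ≤ x ∧ x.toNat < Hn) :
    ∀ (cids : List Int) (m : List (List Int)) (i j : Nat),
    pvShape Hn Wn m → cids.Nodup → (∀ x ∈ cids, 0 ≤ x ∧ x.toNat < Wn) →
    pvEnt (cids.foldl (fun m cid => (pvSweepCol data cid rows (m, init)).1) m) i j =
      (if (j : Int) ∈ cids ∧ (i : Int) ∈ rows then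
        some (pvScanL (fun x => pvCell data x (j : Int) == '#') (pvUpTo (i : Int) rows) init)
      else pvEnt m i j) := by
  intro cids
  induction cids with
  | nil =>
    intro m i j _ _ _
    rw [if_neg (by simp)]
    rfl
  | cons cid t ih =>
    intro m i j hsh hnd hb
    obtain ⟨hcid0, hcidW⟩ := hb cid (by simp)
    rw [List.foldl_cons]
    rw [ih _ i j (pvShape_sweepCol data cid rows _ hsh) (List.Nodup.of_cons hnd)
        (fun x hx => hb x (List.mem_cons_of_mem _ hx))]
    have hsw := pvSweepCol_entry (Hn := Hn) data cid hcid0 hcidW rows m init i j hsh hrs hrb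
    by_cases hir : (i : Int) ∈ rows
    · by_cases hjeq : (j : Int) = cid
      · have hnotmem : cid ∉ t := (List.nodup_cons.mp hnd).1
        have hjt : (j : Int) ∉ t := by rw [hjeq]; exact hnotmem
        have hc1 : ¬ ((j : Int) ∈ t ∧ (i : Int) ∈ rows) := by tauto
        have hc2 : ((j : Int) ∈ cid :: t ∧ (i : Int) ∈ rows) := ⟨by simp [hjeq], hir⟩
        rw [if_neg hc1, if_pos hc2]
        have hc3 : ((i : Int) ∈ rows ∧ j = cid.toNat) := ⟨hir, by omega⟩
        rw [hsw, if_pos hc3, hjeq]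
      · by_cases hjt : (j : Int) ∈ t
        · have hc1 : ((j : Int) ∈ t ∧ (i : Int) ∈ rows) := ⟨hjt, hir⟩
          have hc2 : ((j : Int) ∈ cid :: t ∧ (i : Int) ∈ rows) := ⟨by simp [hjt], hir⟩
          rw [if_pos hc1, if_pos hc2]
        · have hc1 : ¬ ((j : Int) ∈ t ∧ (i : Int) ∈ rows) := by tauto
          have hc2 : ¬ ((j : Int) ∈ cid :: t ∧ (i : Int) ∈ rows) := by simp [hjt, hjeq]
          have hc3 : ¬ ((i : Int) ∈ rows ∧ j = cid.toNat) := by rintro ⟨_, h⟩; omega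
          rw [if_neg hc1, if_neg hc2, hsw, if_neg hc3]
    · have hc1 : ¬ ((j : Int) ∈ t ∧ (i : Int) ∈ rows) := by tauto
      have hc2 : ¬ ((j : Int) ∈ cid :: t ∧ (i : Int) ∈ rows) := by tauto
      have hc3 : ¬ ((i : Int) ∈ rows ∧ j = cid.toNat) := by tauto
      rw [if_neg hc1, if_neg hc2, hsw, if_neg hc3]

theorem pvOuterRow_entry {Hn Wn : Nat} (data : List String) (cols : List Int) (init : Int)
    (hcs : cols.Nodup) (hcb : ∀ x ∈ cols, 0 ≤ x ∧ x.toNat < Wn) :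
    ∀ (rids : List Int) (m : List (List Int)) (i j : Nat),
    pvShape Hn Wn m → rids.Nodup → (∀ x ∈ rids, 0 ≤ x ∧ x.toNat < Hn) →
    pvEnt (rids.foldl (fun m rid => (pvSweepRow data rid cols (m, init)).1) m) i j =
      (if (i : Int) ∈ rids ∧ (j : Int) ∈ cols then
        some (pvScanL (fun x => pvCell data (i : Int) x == '#') (pvUpTo (j : Int) cols) init)
      else pvEnt m i j) := by
  intro rids
  induction rids with
  | nil =>
    intro m i j _ _ _
    rw [if_neg (by simp)]
    rfl
  | cons rid t ih =>
    intro m i j hsh hnd hb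
    obtain ⟨hrid0, hridH⟩ := hb rid (by simp)
    rw [List.foldl_cons]
    rw [ih _ i j (pvShape_sweepRow data rid cols _ hsh) (List.Nodup.of_cons hnd)
        (fun x hx => hb x (List.mem_cons_of_mem _ hx))]
    have hsw := pvSweepRow_entry (Wn := Wn) data rid hrid0 hridH cols m init i j hsh hcs hcb
    by_cases hjc : (j : Int) ∈ cols
    · by_cases hieq : (i : Int) = rid
      · have hnotmem : rid ∉ t := (List.nodup_cons.mp hnd).1
        have hit : (i : Int) ∉ t := by rw [hieq]; exact hnotmem
        have hc1 : ¬ ((i : Int) ∈ t ∧ (j : Int) ∈ cols) := by tauto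
        have hc2 : ((i : Int) ∈ rid :: t ∧ (j : Int) ∈ cols) := ⟨by simp [hieq], hjc⟩
        rw [if_neg hc1, if_pos hc2]
        have hc3 : ((j : Int) ∈ cols ∧ i = rid.toNat) := ⟨hjc, by omega⟩
        rw [hsw, if_pos hc3, hieq]
      · by_cases hit : (i : Int) ∈ t
        · have hc1 : ((i : Int) ∈ t ∧ (j : Int) ∈ cols) := ⟨hit, hjc⟩
          have hc2 : ((i : Int) ∈ rid :: t ∧ (j : Int) ∈ cols) := ⟨by simp [hit], hjc⟩
          rw [if_pos hc1, if_pos hc2]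
        · have hc1 : ¬ ((i : Int) ∈ t ∧ (j : Int) ∈ cols) := by tauto
          have hc2 : ¬ ((i : Int) ∈ rid :: t ∧ (j : Int) ∈ cols) := by simp [hit, hieq]
          have hc3 : ¬ ((j : Int) ∈ cols ∧ i = rid.toNat) := by rintro ⟨_, h⟩; omega
          rw [if_neg hc1, if_neg hc2, hsw, if_neg hc3]
    · have hc1 : ¬ ((i : Int) ∈ t ∧ (j : Int) ∈ cols) := by tauto
      have hc2 : ¬ ((i : Int) ∈ rid :: t ∧ (j : Int) ∈ cols) := by tauto
      have hc3 : ¬ ((j : Int) ∈ cols ∧ i = rid.toNat) := by tauto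
      rw [if_neg hc1, if_neg hc2, hsw, if_neg hc3]

theorem pvUpTo_append_of_not_mem (r : Int) (xs ys : List Int) (h : r ∉ xs) :
    pvUpTo r (xs ++ r :: ys) = xs ++ [r] := by
  induction xs with
  | nil => simp [pvUpTo]
  | cons a t ih =>
    have : a ≠ r := fun hh => h (hh ▸ List.mem_cons_self)
    simp only [List.cons_append, pvUpTo, if_neg this]
    rw [ih (fun hh => h (List.mem_cons_of_mem _ hh))]

theorem pvRange_split (r H : Int) (h0 : 0 ≤ r) (hH : r < H) :
    PySem.List.pyRange 0 H 1 = PySem.List.pyRange 0 r 1 ++ r :: PySem.List.pyRange (r+1) H 1 := by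
  rw [PySem.List.pyRange_one_append 0 r H h0 (le_of_lt hH),
      PySem.List.pyRange_one_cons hH]

theorem pvUpTo_range_up (r H : Int) (h0 : 0 ≤ r) (hH : r < H) :
    pvUpTo r (PySem.List.pyRange 0 H 1) = PySem.List.pyRange 0 (r+1) 1 := by
  rw [pvRange_split r H h0 hH,
      pvUpTo_append_of_not_mem _ _ _ (by simp [PySem.List.mem_pyRange_one]),
      ← PySem.List.pyRange_one_succ_right h0]

theorem pvRange_down_eq_reverse (H : Int) :
    PySem.List.pyRange (H-1) (-1) (-1) = (PySem.List.pyRange 0 H 1).reverse := by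
  rw [PySem.List.pyRange_neg_one_eq_reverse]
  norm_num

theorem pvUpTo_range_down (r H : Int) (h0 : 0 ≤ r) (hH : r < H) :
    pvUpTo r (PySem.List.pyRange (H-1) (-1) (-1)) = (PySem.List.pyRange r H 1).reverse := by
  rw [pvRange_down_eq_reverse, pvRange_split r H h0 hH]
  rw [List.reverse_append, List.reverse_cons, List.append_assoc, List.singleton_append]
  rw [pvUpTo_append_of_not_mem _ _ _
      (by simp [List.mem_reverse, PySem.List.mem_pyRange_one])]
  rw [← List.reverse_cons, ← PySem.List.pyRange_one_cons hH]

theorem pvNewArray_shape (H W : Int) : pvShape H.toNat W.toNat (pvNewArray H W) := by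
  unfold pvNewArray
  rw [PySem.List.foldl_append_singleton_eq_map
      (fun _ => (PySem.List.pyRange 0 W 1).foldl (fun a _ => a ++ [(0:Int)]) [])]
  rw [PySem.List.foldl_append_singleton_eq_map (fun _ => (0:Int))]
  constructor
  · simp [PySem.List.length_pyRange_one]
  · intro i row hrow
    have hmem : row ∈ List.map (fun _ => [] ++ List.map (fun _ => (0:Int)) (PySem.List.pyRange 0 W 1)) (PySem.List.pyRange 0 H 1) := by
      simpa using List.mem_of_getElem? hrow
    obtain ⟨x, _, hx⟩ := List.mem_map.mp hmem
    rw [← hx]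
    simp [PySem.List.length_pyRange_one]

theorem pvColPass_eq (data : List String) (H W init : Int) (hW : 0 ≤ W)
    (rows : List Int) (hnd : rows.Nodup) (hb : ∀ x ∈ rows, 0 ≤ x ∧ x.toNat < H.toNat)
    (hmem : ∀ r : Int, 0 ≤ r → r < H → r ∈ rows)
    (g : Int → Int → Int)
    (hg : ∀ (r c : Int), 0 ≤ r → r < H → 0 ≤ c → c < W →
      g r c = pvScanL (fun x => pvCell data x c == '#') (pvUpTo r rows) init) :
    (PySem.List.pyRange 0 W 1).foldl (fun m cid => (pvSweepCol data cid rows (m, init)).1) (pvNewArray H W)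
      = (PySem.List.pyRange 0 H 1).map (fun r => (PySem.List.pyRange 0 W 1).map (fun c => g r c)) := by
  have hsh0 := pvNewArray_shape H W
  have hshape := pvShape_foldCol (Hn := H.toNat) (Wn := W.toNat) data rows init
      (PySem.List.pyRange 0 W 1) (pvNewArray H W) hsh0
  set lhs := (PySem.List.pyRange 0 W 1).foldl (fun m cid => (pvSweepCol data cid rows (m, init)).1) (pvNewArray H W) with hlhs
  apply List.ext_getElem?
  intro i
  rw [List.getElem?_map, PySem.List.getElem?_pyRange_one]
  by_cases hi : i < H.toNat
  · have hlen : i < lhs.length := by rw [hshape.1]; exact hi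
    obtain ⟨rowA, hrowA⟩ : ∃ rowA, lhs[i]? = some rowA := ⟨_, List.getElem?_eq_getElem hlen⟩
    rw [hrowA, if_pos (show i < (H - 0).toNat by omega)]
    simp only [Option.map_some, Option.some_inj, zero_add]
    apply List.ext_getElem?
    intro j
    rw [List.getElem?_map, PySem.List.getElem?_pyRange_one]
    have hentry : pvEnt lhs i j = rowA[j]? := by simp [pvEnt, hrowA]
    by_cases hj : j < W.toNat
    · rw [if_pos (show j < (W - 0).toNat by omega)]
      simp only [Option.map_some, zero_add]
      rw [← hentry, hlhs]
      rw [pvOuterCol_entry data rows init hnd hb (PySem.List.pyRange 0 W 1) (pvNewArray H W)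
          i j hsh0 (PySem.List.nodup_pyRange_one 0 W)
          (by intro x hx; rw [PySem.List.mem_pyRange_one] at hx; omega)]
      have hcnd : ((j : Int) ∈ PySem.List.pyRange 0 W 1 ∧ (i : Int) ∈ rows) :=
        ⟨by rw [PySem.List.mem_pyRange_one]; omega, hmem i (by omega) (by omega)⟩
      rw [if_pos hcnd, hg _ _ (by omega) (by omega) (by omega) (by omega)]
    · rw [if_neg (show ¬ j < (W - 0).toNat by omega)]
      simp only [Option.map_none]
      exact List.getElem?_eq_none (by rw [hshape.2 i rowA hrowA]; omega)
  · rw [if_neg (by omega), List.getElem?_eq_none (by rw [hshape.1]; omega)]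
    simp

theorem pvRowPass_eq (data : List String) (H W init : Int) (hH : 0 ≤ H)
    (cols : List Int) (hnd : cols.Nodup) (hb : ∀ x ∈ cols, 0 ≤ x ∧ x.toNat < W.toNat)
    (hmem : ∀ c : Int, 0 ≤ c → c < W → c ∈ cols)
    (g : Int → Int → Int)
    (hg : ∀ (r c : Int), 0 ≤ r → r < H → 0 ≤ c → c < W →
      g r c = pvScanL (fun x => pvCell data r x == '#') (pvUpTo c cols) init) :
    (PySem.List.pyRange 0 H 1).foldl (fun m rid => (pvSweepRow data rid cols (m, init)).1) (pvNewArray H W)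
      = (PySem.List.pyRange 0 H 1).map (fun r => (PySem.List.pyRange 0 W 1).map (fun c => g r c)) := by
  have hsh0 := pvNewArray_shape H W
  have hshape := pvShape_foldRow (Hn := H.toNat) (Wn := W.toNat) data cols init
      (PySem.List.pyRange 0 H 1) (pvNewArray H W) hsh0
  set lhs := (PySem.List.pyRange 0 H 1).foldl (fun m rid => (pvSweepRow data rid cols (m, init)).1) (pvNewArray H W) with hlhs
  apply List.ext_getElem?
  intro i
  rw [List.getElem?_map, PySem.List.getElem?_pyRange_one]
  by_cases hi : i < H.toNat
  · have hlen : i < lhs.length := by rw [hshape.1]; exact hi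
    obtain ⟨rowA, hrowA⟩ : ∃ rowA, lhs[i]? = some rowA := ⟨_, List.getElem?_eq_getElem hlen⟩
    rw [hrowA, if_pos (show i < (H - 0).toNat by omega)]
    simp only [Option.map_some, Option.some_inj, zero_add]
    apply List.ext_getElem?
    intro j
    rw [List.getElem?_map, PySem.List.getElem?_pyRange_one]
    have hentry : pvEnt lhs i j = rowA[j]? := by simp [pvEnt, hrowA]
    by_cases hj : j < W.toNat
    · rw [if_pos (show j < (W - 0).toNat by omega)]
      simp only [Option.map_some, zero_add]
      rw [← hentry, hlhs]
      rw [pvOuterRow_entry data cols init hnd hb (PySem.List.pyRange 0 H 1) (pvNewArray H W)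
          i j hsh0 (PySem.List.nodup_pyRange_one 0 H)
          (by intro x hx; rw [PySem.List.mem_pyRange_one] at hx; omega)]
      have hcnd : ((i : Int) ∈ PySem.List.pyRange 0 H 1 ∧ (j : Int) ∈ cols) :=
        ⟨by rw [PySem.List.mem_pyRange_one]; omega, hmem j (by omega) (by omega)⟩
      rw [if_pos hcnd, hg _ _ (by omega) (by omega) (by omega) (by omega)]
    · rw [if_neg (show ¬ j < (W - 0).toNat by omega)]
      simp only [Option.map_none]
      exact List.getElem?_eq_none (by rw [hshape.2 i rowA hrowA]; omega)
  · rw [if_neg (by omega), List.getElem?_eq_none (by rw [hshape.1]; omega)]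
    simp

theorem pvFirst_countdown (p : Int → Bool) (r d : Int) (_h0 : 0 ≤ r) :
    pvFirst p (PySem.List.pyRange r (-1) (-1)) d = pvScanL p (PySem.List.pyRange 0 (r+1) 1) d := by
  rw [pvFirst_eq_scanL_reverse]
  congr 1
  rw [PySem.List.pyRange_neg_one_eq_reverse]
  norm_num

theorem pvFirst_up (p : Int → Bool) (r H d : Int) :
    pvFirst p (PySem.List.pyRange r H 1) d = pvScanL p (PySem.List.pyRange r H 1).reverse d :=
  pvFirst_eq_scanL_reverse p _ d

-- ===== VERDICT (by name: the statement is the Claim_ definition above) =====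
theorem get_min_stones_spec : Claim_equal_get_min_stones := by
  intro data _ _
  unfold Spec_get_min_stones get_min_stones get_min_stones_alt
  set H : Int := (data.length : Int) with hHdef
  set W : Int := PySem.Str.len ((PySem.List.pyGet? data 0).getD "") with hWdef
  have hH : 0 ≤ H := by rw [hHdef]; positivity
  have hW : 0 ≤ W := by rw [hWdef, PySem.Str.len_eq]; positivity
  have hbUp : ∀ x ∈ PySem.List.pyRange 0 H 1, 0 ≤ x ∧ x.toNat < H.toNat := by
    intro x hx; rw [PySem.List.mem_pyRange_one] at hx; omega
  have hbUpW : ∀ x ∈ PySem.List.pyRange 0 W 1, 0 ≤ x ∧ x.toNat < W.toNat := by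
    intro x hx; rw [PySem.List.mem_pyRange_one] at hx; omega
  have hbDown : ∀ x ∈ PySem.List.pyRange (H-1) (-1) (-1), 0 ≤ x ∧ x.toNat < H.toNat := by
    intro x hx
    rw [pvRange_down_eq_reverse, List.mem_reverse, PySem.List.mem_pyRange_one] at hx
    omega
  have hbDownW : ∀ x ∈ PySem.List.pyRange (W-1) (-1) (-1), 0 ≤ x ∧ x.toNat < W.toNat := by
    intro x hx
    rw [pvRange_down_eq_reverse, List.mem_reverse, PySem.List.mem_pyRange_one] at hx
    omega
  refine Prod.ext ?_ (Prod.ext ?_ (Prod.ext ?_ ?_))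
  · -- N
    apply pvColPass_eq data H W (-1) hW (PySem.List.pyRange 0 H 1) (PySem.List.nodup_pyRange_one 0 H) hbUp
      (fun r h0 h1 => by rw [PySem.List.mem_pyRange_one]; omega)
    intro r c h0r hrH h0c hcW
    rw [pvFirst_countdown _ _ _ h0r, pvUpTo_range_up r H h0r hrH]
  · -- W
    apply pvRowPass_eq data H W (-1) hH (PySem.List.pyRange 0 W 1) (PySem.List.nodup_pyRange_one 0 W) hbUpW
      (fun c h0 h1 => by rw [PySem.List.mem_pyRange_one]; omega)
    intro r c h0r hrH h0c hcW
    rw [pvFirst_countdown _ _ _ h0c, pvUpTo_range_up c W h0c hcW]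
  · -- S
    apply pvColPass_eq data H W H hW (PySem.List.pyRange (H-1) (-1) (-1))
      (by rw [pvRange_down_eq_reverse]; exact List.nodup_reverse.mpr (PySem.List.nodup_pyRange_one 0 H))
      hbDown
      (fun r h0 h1 => by
        rw [pvRange_down_eq_reverse, List.mem_reverse, PySem.List.mem_pyRange_one]; omega)
    intro r c h0r hrH h0c hcW
    rw [pvFirst_up, pvUpTo_range_down r H h0r hrH]
  · -- E
    apply pvRowPass_eq data H W W hH (PySem.List.pyRange (W-1) (-1) (-1))
      (by rw [pvRange_down_eq_reverse]; exact List.nodup_reverse.mpr (PySem.List.nodup_pyRange_one 0 W))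
      hbDownW
      (fun c h0 h1 => by
        rw [pvRange_down_eq_reverse, List.mem_reverse, PySem.List.mem_pyRange_one]; omega)
    intro r c h0r hrH h0c hcW
    rw [pvFirst_up, pvUpTo_range_down c W h0c hcW]
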